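-- pv_equiv track=rewrite | github.com/msei99/pbgui | logging_helpers.py | _extract_leading_brackets
-- ===== SOURCE A (Python) =====
-- def _extract_leading_brackets(s: str):
--     """Extract consecutive leading bracketed tokens from the start of string.
--     Returns (tags_list, rest_of_string).
--     """
--     tags = []
--     pos = 0
--     L = len(s)
--     # skip leading spaces
--     while pos < L and s[pos].isspace():
--         pos += 1
--     while pos < L and s[pos] == '[':
--         end = s.find(']', pos+1)
--         if end == -1:
--             break
--         content = s[pos+1:end].strip()
--         tags.append(content)
--         pos = end + 1
--         # skip spaces after bracket
--         while pos < L and s[pos].isspace():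
--             pos += 1
--     rest = s[pos:].lstrip()
--     return tags, rest
-- ===== SOURCE B (Python) =====
-- def _extract_leading_brackets(s: str):
--     """Extract consecutive leading bracketed tokens from the start of string.
--     Returns (tags_list, rest_of_string)."""
--     tags = []
--     t = s.lstrip()
--     while t.startswith('[') and ']' in t:
--         head, _, rest = t.partition(']')
--         tags.append(head[1:].strip())
--         t = rest.lstrip()
--     return tags, t
-- ===== Notes on version B (the rewrite author's own statement) =====
-- stated objective: simpler
-- what changed: Replaces A's three index-tracking while loops (manual pos arithmetic, find with a start offset, slicing by indices) by a single loop over the shrinking string using lstrip/startswith/partition, with no index bookkeeping.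
import Mathlib
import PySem

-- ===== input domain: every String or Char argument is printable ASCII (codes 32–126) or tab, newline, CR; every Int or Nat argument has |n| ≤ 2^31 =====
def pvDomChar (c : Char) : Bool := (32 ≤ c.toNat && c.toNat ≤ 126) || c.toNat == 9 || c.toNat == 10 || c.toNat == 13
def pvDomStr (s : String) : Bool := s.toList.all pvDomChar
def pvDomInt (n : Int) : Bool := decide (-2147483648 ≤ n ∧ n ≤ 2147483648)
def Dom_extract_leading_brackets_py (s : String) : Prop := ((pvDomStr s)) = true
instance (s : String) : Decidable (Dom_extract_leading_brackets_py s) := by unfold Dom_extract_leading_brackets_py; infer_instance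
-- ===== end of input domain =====

-- B replaces A's three index-tracking while loops (manual pos arithmetic, find with a
-- start offset, slicing by indices) by one loop over the shrinking string using
-- lstrip/startswith/partition; objective: simpler. Loops are ported as structural
-- recursion on a fuel argument that provably dominates the iteration count.

-- ===== PORT A =====
-- 'while pos < L and s[pos].isspace(): pos += 1' (both occurrences in A).
-- Fuel: pos strictly increases while pos < len s, so len s + 1 steps always suffice.
def pvSkipAGo : Nat → List Char → Nat → Nat
  | 0, _, pos => pos
  | fuel + 1, s, pos =>
    if h : pos < s.length then
      if PySem.Chars.isspace s[pos] then pvSkipAGo fuel s (pos + 1) else pos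
    else pos

def pvSkipA (s : List Char) (pos : Nat) : Nat := pvSkipAGo (s.length + 1) s pos

-- 'while pos < L and s[pos] == "[": …'.  Fuel: pos strictly increases each iteration.
def pvLoopAGo : Nat → List Char → List (List Char) → Nat → List (List Char) × Nat
  | 0, _, tags, pos => (tags, pos)
  | fuel + 1, s, tags, pos =>
    if h : pos < s.length then
      if s[pos] = '[' then
        let e := PySem.Chars.findFrom s [']'] ((pos : Int) + 1)
        if he : e = -1 then (tags, pos)
        else
          let content := PySem.Chars.strip (PySem.Chars.slice s (some ((pos : Int) + 1)) (some e))
          pvLoopAGo fuel s (tags ++ [content]) (pvSkipA s (e.toNat + 1))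
      else (tags, pos)
    else (tags, pos)

def pvLoopA (s : List Char) (tags : List (List Char)) (pos : Nat) : List (List Char) × Nat :=
  pvLoopAGo (s.length + 1) s tags pos

def extract_leading_brackets_py (s : String) : List String × String :=
  let cs := s.toList
  let pos := pvSkipA cs 0
  let r := pvLoopA cs [] pos
  let rest := PySem.Chars.lstrip (PySem.Chars.slice cs (some (r.2 : Int)) none)
  (r.1.map String.ofList, String.ofList rest)

-- ===== PORT B =====
-- 'while t.startswith("[") and "]" in t: head, _, rest = t.partition("]"); …; t = rest.lstrip()'.
-- Fuel: t strictly shrinks each iteration, so (initial length) + 1 steps always suffice.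
def pvLoopBGo : Nat → List (List Char) → List Char → List (List Char) × List Char
  | 0, tags, t => (tags, t)
  | fuel + 1, tags, t =>
    if PySem.Chars.startswith t ['['] && PySem.Chars.isIn [']'] t then
      -- head, _, rest = t.partition(']')  (']' is present here)
      let e := (PySem.Chars.find t [']']).toNat
      let head := t.take e
      let rest := t.drop (e + 1)
      pvLoopBGo fuel (tags ++ [PySem.Chars.strip (head.drop 1)]) (PySem.Chars.lstrip rest)
    else (tags, t)

def extract_leading_brackets_py_alt (s : String) : List String × String :=
  let r := pvLoopBGo (s.toList.length + 1) [] (PySem.Chars.lstrip s.toList)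
  (r.1.map String.ofList, String.ofList r.2)

-- ===== PRECONDITION & SPEC =====
def Spec_extract_leading_brackets_py (s : String) (out : List String × String) : Prop := out = extract_leading_brackets_py_alt s
instance (s : String) (out : List String × String) : Decidable (Spec_extract_leading_brackets_py s out) := by unfold Spec_extract_leading_brackets_py; infer_instance

-- ===== CLAIM (what is proved, stated in full; the proofs are below) =====
def Claim_equal_extract_leading_brackets_py : Prop := ∀ (s : String), Dom_extract_leading_brackets_py s → Spec_extract_leading_brackets_py s (extract_leading_brackets_py s)

-- ===== LEMMAS AND PROOFS =====

theorem pv_lstrip_idem (t : List Char) :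
    PySem.Chars.lstrip (PySem.Chars.lstrip t) = PySem.Chars.lstrip t := by
  simp only [PySem.Chars.lstrip]
  induction t with
  | nil => rfl
  | cons a t ih =>
    by_cases h : PySem.Chars.isspace a
    · simpa [h] using ih
    · simp [h]

theorem pvSkipAGo_ge (fuel : Nat) (s : List Char) : ∀ pos, pos ≤ pvSkipAGo fuel s pos := by
  induction fuel with
  | zero => intro pos; exact le_refl _
  | succ fuel ih =>
    intro pos
    simp only [pvSkipAGo]
    split
    · split
      · exact le_trans (by omega) (ih (pos + 1))
      · exact le_refl _
    · exact le_refl _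

theorem pv_drop_pvSkipAGo (s : List Char) (fuel : Nat) :
    ∀ pos, s.length ≤ pos + fuel →
      s.drop (pvSkipAGo fuel s pos) = PySem.Chars.lstrip (s.drop pos) := by
  induction fuel with
  | zero =>
    intro pos hf
    have hnil : s.drop pos = [] := List.drop_eq_nil_of_le (by omega)
    simp [pvSkipAGo, hnil, PySem.Chars.lstrip]
  | succ fuel ih =>
    intro pos hf
    simp only [pvSkipAGo]
    split
    · rename_i h
      have hd : s.drop pos = s[pos] :: s.drop (pos + 1) := List.drop_eq_getElem_cons h
      split
      · rename_i hsp
        rw [ih (pos + 1) (by omega), hd]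
        simp only [PySem.Chars.lstrip, List.dropWhile_cons, hsp, reduceIte]
      · rename_i hsp
        have hsp' : PySem.Chars.isspace s[pos] = false := by simpa using hsp
        rw [hd]
        simp only [PySem.Chars.lstrip, List.dropWhile_cons, hsp', Bool.false_eq_true, reduceIte]
    · rename_i h
      have hnil : s.drop pos = [] := List.drop_eq_nil_of_le (by omega)
      simp [hnil, PySem.Chars.lstrip]

theorem pv_drop_pvSkipA (s : List Char) (pos : Nat) :
    s.drop (pvSkipA s pos) = PySem.Chars.lstrip (s.drop pos) :=
  pv_drop_pvSkipAGo s (s.length + 1) pos (by omega)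

theorem pv_find_cons_found (a c : Char) (v : List Char) (ha : a ≠ c)
    (h : PySem.Chars.find v [c] ≠ -1) :
    PySem.Chars.find (a :: v) [c] = 1 + PySem.Chars.find v [c] := by
  have hv0 : 0 ≤ PySem.Chars.find v [c] := by
    have := PySem.Chars.neg_one_le_find v [c]
    omega
  obtain ⟨hp, hmin⟩ := PySem.Chars.find_spec (s := v) (sub := [c]) hv0
  have hmem : c ∈ v := by
    rw [← List.singleton_infix_iff, ← PySem.Chars.find_ne_neg_one_iff]
    exact h
  have hu0 : 0 ≤ PySem.Chars.find (a :: v) [c] := by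
    rw [PySem.Chars.find_nonneg_iff, List.singleton_infix_iff]
    exact List.mem_cons_of_mem a hmem
  obtain ⟨hp', hmin'⟩ := PySem.Chars.find_spec (s := a :: v) (sub := [c]) hu0
  set n := (PySem.Chars.find (a :: v) [c]).toNat with hn
  set f := (PySem.Chars.find v [c]).toNat with hf
  have hne0 : n ≠ 0 := by
    intro h0
    rw [h0] at hp'
    simp at hp'
    exact ha hp'.symm
  have hle : n ≤ 1 + f := by
    by_contra hgt
    refine hmin' (1 + f) (by omega) ?_
    rw [Nat.add_comm, List.drop_succ_cons]
    exact hp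
  have hge : 1 + f ≤ n := by
    by_contra hlt
    have hn1 : n - 1 < f := by omega
    have hdr : [c] <+: v.drop (n - 1) := by
      have hnn : (a :: v).drop n = v.drop (n - 1) := by
        obtain ⟨m, hm⟩ : ∃ m, n = m + 1 := ⟨n - 1, by omega⟩
        rw [hm]
        simp
      rwa [hnn] at hp'
    exact hmin (n - 1) hn1 hdr
  omega

theorem pv_main_go (s : List Char) : ∀ (fa : Nat), ∀ (fb : Nat) (tags : List (List Char)) (pos : Nat),
    s.length - pos < fa → (s.drop pos).length < fb →
    s.drop pos = PySem.Chars.lstrip (s.drop pos) →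
    ((pvLoopAGo fa s tags pos).1,
      PySem.Chars.lstrip (s.drop (pvLoopAGo fa s tags pos).2)) =
    pvLoopBGo fb tags (s.drop pos) := by
  intro fa
  induction fa with
  | zero => intro fb tags pos hfa; omega
  | succ fa ih =>
    intro fb tags pos hfa hfb hp
    obtain ⟨gb, rfl⟩ : ∃ gb, fb = gb + 1 := ⟨fb - 1, by omega⟩
    simp only [pvLoopAGo, pvLoopBGo]
    split
    · rename_i h
      have hd : s.drop pos = s[pos] :: s.drop (pos + 1) := List.drop_eq_getElem_cons h
      split
      · rename_i hbr
        have h1 : ((pos : Int) + 1) = ((pos + 1 : Nat) : Int) := by push_cast; ring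
        rw [h1, PySem.Chars.findFrom_natCast s [']'] (pos + 1) (by omega)]
        have hsw : PySem.Chars.startswith (s.drop pos) ['['] = true := by
          rw [hd, PySem.Chars.startswith_iff]
          exact List.cons_prefix_cons.mpr ⟨hbr.symm, List.nil_prefix⟩
        by_cases hfind : PySem.Chars.find (s.drop (pos + 1)) [']'] = -1
        · have hin : PySem.Chars.isIn [']'] (s.drop pos) = false := by
            rw [PySem.Chars.isIn_eq_false_iff, List.singleton_infix_iff, hd]
            rw [PySem.Chars.find_eq_neg_one_iff, List.singleton_infix_iff] at hfind
            simp [hbr, hfind]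
          simp [hfind, hin, ← hp]
        · have hv0 : 0 ≤ PySem.Chars.find (s.drop (pos + 1)) [']'] := by
            have := PySem.Chars.neg_one_le_find (s.drop (pos + 1)) [']']
            omega
          set fn := (PySem.Chars.find (s.drop (pos + 1)) [']']).toNat with hfn
          have hfe : PySem.Chars.find (s.drop (pos + 1)) [']'] = (fn : Int) :=
            (Int.toNat_of_nonneg hv0).symm
          have h2 : ((pos + 1 : Nat) : Int) + PySem.Chars.find (s.drop (pos + 1)) [']'] =
              ((pos + 1 + fn : Nat) : Int) := by
            rw [hfe]; push_cast; ring
          rw [if_neg hfind, h2, dif_neg (by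
            intro hcontra
            omega)]
          simp only [Int.toNat_natCast, PySem.Chars.slice_eq_listSlice,
            PySem.List.slice_natCast, Nat.add_sub_cancel_left]
          have hmem : (']' : Char) ∈ s.drop (pos + 1) := by
            rw [← List.singleton_infix_iff, ← PySem.Chars.find_ne_neg_one_iff]
            exact hfind
          have hin : PySem.Chars.isIn [']'] (s.drop pos) = true := by
            rw [PySem.Chars.isIn_iff_infix, List.singleton_infix_iff, hd]
            exact List.mem_cons_of_mem _ hmem
          have hcond : (PySem.Chars.startswith (s.drop pos) ['['] &&
              PySem.Chars.isIn [']'] (s.drop pos)) = true := by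
            simp [hsw, hin]
          rw [if_pos hcond]
          have hfw : PySem.Chars.find (s.drop pos) [']'] = 1 + (fn : Int) := by
            rw [hd, hbr, pv_find_cons_found '[' ']' _ (by decide) hfind, hfe]
          have htn : (1 + (fn : Int)).toNat = fn + 1 := by omega
          rw [hfw, htn]
          have hrest : (s.drop pos).drop (fn + 1 + 1) = s.drop (pos + 1 + fn + 1) := by
            rw [hd, List.drop_succ_cons, List.drop_drop]
            congr 1
          have hhead : ((s.drop pos).take (fn + 1)).drop 1 = (s.drop (pos + 1)).take fn := by
            rw [hd, List.take_succ_cons, List.drop_succ_cons, List.drop_zero]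
          rw [hrest, hhead]
          have hnp : s.drop (pvSkipA s (pos + 1 + fn + 1)) =
              PySem.Chars.lstrip (s.drop (pos + 1 + fn + 1)) := pv_drop_pvSkipA s (pos + 1 + fn + 1)
          have hp2 : s.drop (pvSkipA s (pos + 1 + fn + 1)) =
              PySem.Chars.lstrip (s.drop (pvSkipA s (pos + 1 + fn + 1))) := by
            rw [hnp, pv_lstrip_idem]
          have hskip : pos + 1 + fn + 1 ≤ pvSkipA s (pos + 1 + fn + 1) :=
            pvSkipAGo_ge (s.length + 1) s (pos + 1 + fn + 1)
          have hrec := ih gb (tags ++ [PySem.Chars.strip ((s.drop (pos + 1)).take fn)])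
            (pvSkipA s (pos + 1 + fn + 1)) (by omega)
            (by simp only [List.length_drop] at hfb ⊢; omega) hp2
          rw [hrec, hnp]
      · rename_i hbr
        have hsw : PySem.Chars.startswith (s.drop pos) ['['] = false := by
          rw [hd]
          rw [Bool.eq_false_iff]
          intro htrue
          rw [PySem.Chars.startswith_iff] at htrue
          rcases List.cons_prefix_cons.mp htrue with ⟨h1, -⟩
          exact hbr h1.symm
        rw [hsw]
        simp [← hp]
    · rename_i h
      have hnil : s.drop pos = [] := List.drop_eq_nil_of_le (by omega)
      rw [hnil]
      simp [PySem.Chars.lstrip, PySem.Chars.startswith_iff]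

-- ===== VERDICT (by name: the statement is the Claim_ definition above) =====
theorem extract_leading_brackets_py_spec : Claim_equal_extract_leading_brackets_py := by
  intro s _
  unfold Spec_extract_leading_brackets_py extract_leading_brackets_py extract_leading_brackets_py_alt pvLoopA
  have h0 : s.toList.drop (pvSkipA s.toList 0) =
      PySem.Chars.lstrip (s.toList.drop (pvSkipA s.toList 0)) := by
    rw [pv_drop_pvSkipA, List.drop_zero, pv_lstrip_idem]
  have hm := pv_main_go s.toList (s.toList.length + 1) (s.toList.length + 1) []
    (pvSkipA s.toList 0) (by omega) (by simp only [List.length_drop]; omega) h0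
  rw [pv_drop_pvSkipA, List.drop_zero] at hm
  simp only [PySem.Chars.slice_eq_listSlice, PySem.List.slice_from_natCast]
  rw [Prod.ext_iff] at hm
  dsimp only at hm
  rw [hm.1, hm.2]
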